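-- pv_equiv track=rewrite | github.com/top-dev-bln/UBB | Semestrul 1/Fundamentele Programarii/Laboratoare/Lab8/iterativ.py | gasit_pozitive_iterativ
-- ===== SOURCE A (Python) =====
-- def gasit_pozitive_iterativ(numere):
--     if not numere:
--         return []
--
--     n = len(numere)
--
--     solutii = []
--
--     combinatii = 2 ** (n - 1)
--
--     for i in range(combinatii):
--         expr = str(numere[0])
--         rezultat = numere[0]
--
--
--         for j in range(n - 1):
--             if (i // (2 ** j)) % 2 == 0:
--                 operator = "+"
--             else:
--                 operator = "-"
--
--
--             if operator == "+":
--                 rezultat += numere[j + 1]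
--             else:
--                 rezultat -= numere[j + 1]
--             expr += operator + str(numere[j + 1])
--
--
--         if rezultat > 0:
--             solutii.append(expr)
--
--     return solutii
-- ===== SOURCE B (Python) =====
-- def gasit_pozitive_iterativ(numere):
--     if not numere:
--         return []
--
--     def solve(k):
--         if k == 0:
--             return [(str(numere[0]), numere[0])]
--         prev = solve(k - 1)
--         x = numere[k]
--         sx = str(x)
--         return ([(e + "+" + sx, r + x) for e, r in prev]
--                 + [(e + "-" + sx, r - x) for e, r in prev])
--
--     return [e for e, r in solve(len(numere) - 1) if r > 0]
-- ===== Notes on version B (the rewrite author's own statement) =====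
-- stated objective: simpler
-- what changed: Replaces A's bit-mask enumeration (outer loop over 2^(n-1) masks with an inner loop decoding each bit by floor-division) with a structural recursion solve(k) that builds the whole list of (expression, result) pairs for numere[0..k], appending the '+'-extended block before the '-'-extended block, then filters the positive results.
import Mathlib
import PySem

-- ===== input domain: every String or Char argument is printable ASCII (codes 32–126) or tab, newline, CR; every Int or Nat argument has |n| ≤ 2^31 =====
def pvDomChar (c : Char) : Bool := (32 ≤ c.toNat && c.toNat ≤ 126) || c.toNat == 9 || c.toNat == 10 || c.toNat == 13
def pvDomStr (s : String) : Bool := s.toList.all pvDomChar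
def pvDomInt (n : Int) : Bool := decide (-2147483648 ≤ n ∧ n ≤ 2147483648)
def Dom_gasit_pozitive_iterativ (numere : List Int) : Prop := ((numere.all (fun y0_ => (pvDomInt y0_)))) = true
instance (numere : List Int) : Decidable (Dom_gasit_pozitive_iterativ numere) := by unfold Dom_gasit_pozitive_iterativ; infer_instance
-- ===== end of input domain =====

-- B replaces A's bit-mask enumeration by a recursion on the number of operators
-- (solve k = expressions over numere[0..k], '+'-block before '-'-block); objective: simpler.

-- ===== PORT A =====
-- inner loop of A: build (expr, rezultat) for mask i with n1 = n - 1 operators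
-- (2 ** j with j ≥ 0 is ported as 2 ^ j.toNat — exact since range yields j ≥ 0;
--  numere[0] / numere[j+1] are in range for nonempty numere and j < n-1, so pyGetD is exact)
def pvRowA (numere : List Int) (n1 : Int) (i : Int) : String × Int :=
  (PySem.List.pyRange 0 n1 1).foldl
    (fun st j =>
      let operator : String :=
        if PySem.Int.mod (PySem.Int.floordiv i (2 ^ j.toNat)) 2 = 0 then "+" else "-"
      let rezultat : Int :=
        if operator = "+" then st.2 + PySem.List.pyGetD numere (j + 1) 0
        else st.2 - PySem.List.pyGetD numere (j + 1) 0
      (st.1 ++ operator ++ PySem.Int.toStr (PySem.List.pyGetD numere (j + 1) 0), rezultat))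
    (PySem.Int.toStr (PySem.List.pyGetD numere 0 0), PySem.List.pyGetD numere 0 0)

def gasit_pozitive_iterativ (numere : List Int) : List String :=
  if numere = [] then []
  else
    let n : Int := PySem.List.len numere
    let combinatii : Int := 2 ^ (n - 1).toNat   -- 2 ** (n - 1), n ≥ 1 so exact
    (PySem.List.pyRange 0 combinatii 1).foldl
      (fun solutii i =>
        let er := pvRowA numere (n - 1) i
        if er.2 > 0 then solutii ++ [er.1] else solutii)
      []

-- ===== PORT B =====
-- solve(k) from Source B: all (expr, result) pairs over numere[0..k]
def pvSolveB (numere : List Int) : Nat → List (String × Int)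
  | 0 => [(PySem.Int.toStr (PySem.List.pyGetD numere 0 0), PySem.List.pyGetD numere 0 0)]
  | k + 1 =>
    let prev := pvSolveB numere k
    let x := PySem.List.pyGetD numere ((k : Int) + 1) 0
    prev.map (fun er => (er.1 ++ "+" ++ PySem.Int.toStr x, er.2 + x)) ++
      prev.map (fun er => (er.1 ++ "-" ++ PySem.Int.toStr x, er.2 - x))

def gasit_pozitive_iterativ_alt (numere : List Int) : List String :=
  if numere = [] then []
  else ((pvSolveB numere (numere.length - 1)).filter (fun er => er.2 > 0)).map Prod.fst

-- ===== PRECONDITION & SPEC =====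
def Spec_gasit_pozitive_iterativ (numere : List Int) (out : List String) : Prop := out = gasit_pozitive_iterativ_alt numere
instance (numere : List Int) (out : List String) : Decidable (Spec_gasit_pozitive_iterativ numere out) := by unfold Spec_gasit_pozitive_iterativ; infer_instance

-- ===== CLAIM (what is proved, stated in full; the proofs are below) =====
def Claim_equal_gasit_pozitive_iterativ : Prop := ∀ (numere : List Int), Dom_gasit_pozitive_iterativ numere → Spec_gasit_pozitive_iterativ numere (gasit_pozitive_iterativ numere)

-- ===== LEMMAS AND PROOFS =====

-- bit j of m + 2^k equals bit j of m for j < k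
lemma pv_bit_low (m j k : Nat) (hj : j < k) :
    (2 ^ k + m) / 2 ^ j % 2 = m / 2 ^ j % 2 := by
  have hdvd : 2 ^ j * 2 ^ (k - j) = 2 ^ k := by
    rw [← pow_add]; congr 1; omega
  have h1 : (2 ^ k + m) / 2 ^ j = 2 ^ (k - j) + m / 2 ^ j := by
    rw [← hdvd, Nat.add_comm, Nat.add_mul_div_left _ _ (Nat.two_pow_pos j),
      Nat.add_comm]
  rw [h1]
  have h2 : 2 ^ (k - j) = 2 * 2 ^ (k - j - 1) := by
    rw [← pow_succ']; congr 1; omega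
  omega

-- mod by the literal 2, as a Nat computation
lemma pv_mod2_natCast (a : Nat) : PySem.Int.mod (a : Int) 2 = ((a % 2 : Nat) : Int) := by
  exact_mod_cast PySem.Int.mod_natCast a 2

-- the inner fold only reads bits j < k of i; equal low bits give equal rows
lemma pvRowA_congr (numere : List Int) (k : Nat) (i i' : Int)
    (h : ∀ j : Nat, j < k →
      PySem.Int.mod (PySem.Int.floordiv i (2 ^ j)) 2
        = PySem.Int.mod (PySem.Int.floordiv i' (2 ^ j)) 2) :
    pvRowA numere (k : Int) i = pvRowA numere (k : Int) i' := by
  unfold pvRowA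
  apply PySem.List.foldl_congr_mem
  intro st j hj
  rw [PySem.List.mem_pyRange_one] at hj
  obtain ⟨hj0, hjk⟩ := hj
  have hjn : j = ((j.toNat : Nat) : Int) := by omega
  have := h j.toNat (by omega)
  rw [this]

-- extend a row by one more operator: pyRange 0 (k+1) = pyRange 0 k ++ [k]
lemma pvRowA_succ (numere : List Int) (k : Nat) (i : Int) :
    pvRowA numere ((k : Int) + 1) i =
      (let st := pvRowA numere (k : Int) i
       let operator : String :=
         if PySem.Int.mod (PySem.Int.floordiv i (2 ^ k)) 2 = 0 then "+" else "-"
       let rezultat : Int :=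
         if operator = "+" then st.2 + PySem.List.pyGetD numere ((k : Int) + 1) 0
         else st.2 - PySem.List.pyGetD numere ((k : Int) + 1) 0
       (st.1 ++ operator ++ PySem.Int.toStr (PySem.List.pyGetD numere ((k : Int) + 1) 0), rezultat)) := by
  unfold pvRowA
  rw [PySem.List.pyRange_one_succ_right (by positivity)]
  rw [List.foldl_append]
  simp

-- key invariant: A's rows over all masks, in mask order, are exactly B's solve
lemma pv_rows_eq_solve (numere : List Int) (k : Nat) :
    (List.range (2 ^ k)).map (fun m : Nat => pvRowA numere (k : Int) ((m : Int)))
      = pvSolveB numere k := by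
  induction k with
  | zero =>
    simp [pvSolveB, pvRowA, PySem.List.pyRange_one_eq_nil]
  | succ k ih =>
    have hsplit : 2 ^ (k + 1) = 2 ^ k + 2 ^ k := by ring
    rw [hsplit, List.range_add, List.map_append, List.map_map]
    have hplus : (List.range (2 ^ k)).map (fun m : Nat => pvRowA numere ((k : Int) + 1) ((m : Int)))
        = (pvSolveB numere k).map
            (fun er => (er.1 ++ "+" ++ PySem.Int.toStr (PySem.List.pyGetD numere ((k : Int) + 1) 0),
                        er.2 + PySem.List.pyGetD numere ((k : Int) + 1) 0)) := by
      rw [← ih, List.map_map]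
      apply List.map_congr_left
      intro m hm
      rw [List.mem_range] at hm
      rw [Function.comp_apply, pvRowA_succ]
      have hbit : PySem.Int.mod (PySem.Int.floordiv (m : Int) (2 ^ k)) 2 = 0 := by
        have h2 : ((2:Int) ^ k) = ((2 ^ k : Nat) : Int) := by push_cast; ring
        rw [h2, PySem.Int.floordiv_natCast, pv_mod2_natCast, Nat.div_eq_of_lt hm]
        simp
      simp only [hbit]
      norm_num
    have hminus : (List.range (2 ^ k)).map
          ((fun m : Nat => pvRowA numere ((k : Int) + 1) ((m : Int))) ∘ (fun m : Nat => 2 ^ k + m))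
        = (pvSolveB numere k).map
            (fun er => (er.1 ++ "-" ++ PySem.Int.toStr (PySem.List.pyGetD numere ((k : Int) + 1) 0),
                        er.2 - PySem.List.pyGetD numere ((k : Int) + 1) 0)) := by
      rw [← ih, List.map_map]
      apply List.map_congr_left
      intro m hm
      rw [List.mem_range] at hm
      rw [Function.comp_apply, Function.comp_apply]
      have hlow : pvRowA numere (k : Int) ((2 ^ k + m : Nat) : Int)
          = pvRowA numere (k : Int) (m : Int) := by
        apply pvRowA_congr
        intro j hj
        have h2 : ((2:Int) ^ j) = ((2 ^ j : Nat) : Int) := by push_cast; ring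
        rw [h2, PySem.Int.floordiv_natCast, pv_mod2_natCast,
          PySem.Int.floordiv_natCast, pv_mod2_natCast, pv_bit_low m j k hj]
      have hbit : PySem.Int.mod (PySem.Int.floordiv ((2 ^ k + m : Nat) : Int) (2 ^ k)) 2 = 1 := by
        have h2 : ((2:Int) ^ k) = ((2 ^ k : Nat) : Int) := by push_cast; ring
        rw [h2, PySem.Int.floordiv_natCast, pv_mod2_natCast]
        have h1 : (2 ^ k + m) / 2 ^ k = 1 := by
          rw [Nat.add_comm, Nat.add_div_right _ (Nat.two_pow_pos k),
            Nat.div_eq_of_lt hm]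
        rw [h1]
        norm_num
      rw [pvRowA_succ, hlow]
      simp only [hbit]
      norm_num
      exact fun hs => absurd hs (by decide)
    simp only [Nat.cast_add, Nat.cast_one]
    rw [hplus, hminus]
    rfl

-- appending-if accumulation is filter-then-map
lemma pv_fold_filter {α : Type} (g : α → String × Int) (l : List α) (acc : List String) :
    l.foldl (fun s x => if (g x).2 > 0 then s ++ [(g x).1] else s) acc
      = acc ++ ((l.map g).filter (fun er => er.2 > 0)).map Prod.fst := by
  induction l generalizing acc with
  | nil => simp
  | cons x xs ih =>
    simp only [List.foldl_cons, List.map_cons, List.filter_cons]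
    by_cases hx : (g x).2 > 0
    · rw [ih]; simp [hx]
    · rw [ih]; simp [hx]

-- A's outer loop produces (filter then map fst) of B's rows
lemma pv_outer (numere : List Int) (k : Nat) :
    (PySem.List.pyRange 0 ((2 ^ k : Nat) : Int) 1).foldl
        (fun solutii i =>
          if (pvRowA numere (k : Int) i).2 > 0 then solutii ++ [(pvRowA numere (k : Int) i).1]
          else solutii) []
      = ((pvSolveB numere k).filter (fun er => er.2 > 0)).map Prod.fst := by
  rw [PySem.List.pyRange_zero_natCast, List.foldl_map,
    pv_fold_filter (fun m : Nat => pvRowA numere (k : Int) ((m : Int))) (List.range (2 ^ k)) [],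
    pv_rows_eq_solve]
  simp

-- ===== VERDICT (by name: the statement is the Claim_ definition above) =====
theorem gasit_pozitive_iterativ_spec : Claim_equal_gasit_pozitive_iterativ := by
  intro numere _
  unfold Spec_gasit_pozitive_iterativ gasit_pozitive_iterativ gasit_pozitive_iterativ_alt
  by_cases h : numere = []
  · simp [h]
  · rw [if_neg h, if_neg h]
    have hlen0 : numere.length ≠ 0 := fun hl => h (List.eq_nil_of_length_eq_zero hl)
    simp only [PySem.List.len_eq]
    have hc : ((numere.length : Int) - 1) = ((numere.length - 1 : Nat) : Int) := by omega
    have hpow : (2 : Int) ^ (numere.length - 1)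
        = ((2 ^ (numere.length - 1) : Nat) : Int) := by push_cast; ring
    simp only [hc, Int.toNat_natCast, hpow]
    exact pv_outer numere (numere.length - 1)
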